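-- pv_equiv track=rewrite | github.com/bin3377/ortools-poc | app/services/scheduler.py | _check_mobility_compatibility
-- ===== SOURCE A (Python) =====
-- from typing import Any, Dict, List, Optional
--
-- def _check_mobility_compatibility(
--     vehicle_seat_types: Dict, mobility_assistance: List[str]
-- ) -> bool:
--     """检查车辆座位类型是否支持乘客的移动辅助需求"""
--     for assistance in mobility_assistance:
--         assistance_lower = assistance.lower()
--         if assistance_lower == "wheelchair" and not vehicle_seat_types.get(
--             "wheelchair", False
--         ):
--             return False
--         elif assistance_lower in [
--             "cane or walker",
--             "cane",
--             "walker",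
--         ] and not vehicle_seat_types.get("cane_walker", False):
--             return False
--         elif assistance_lower == "stretcher" and not vehicle_seat_types.get(
--             "stretcher", False
--         ):
--             return False
--         # 对于"ambulatory"（行走正常），所有车辆都支持
--     return True
-- ===== SOURCE B (Python) =====
-- def _check_mobility_compatibility(vehicle_seat_types, mobility_assistance):
--     """Aggregate-first: collect the set of lowered labels once, then test each
--     seat feature exactly once (instead of re-checking per passenger)."""
--     labels = {a.lower() for a in mobility_assistance}
--     return (
--         ("wheelchair" not in labels or vehicle_seat_types.get("wheelchair", False))
--         and (not any(l in labels for l in ("cane or walker", "cane", "walker"))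
--              or vehicle_seat_types.get("cane_walker", False))
--         and ("stretcher" not in labels or vehicle_seat_types.get("stretcher", False))
--     )
-- ===== Notes on version B (the rewrite author's own statement) =====
-- stated objective: alternative
-- what changed: B inverts the iteration: instead of A's per-passenger early-return cascade over seat lookups, B first aggregates the set of lowercased labels in one pass and then tests each of the three seat features exactly once against that set.
import Mathlib
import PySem

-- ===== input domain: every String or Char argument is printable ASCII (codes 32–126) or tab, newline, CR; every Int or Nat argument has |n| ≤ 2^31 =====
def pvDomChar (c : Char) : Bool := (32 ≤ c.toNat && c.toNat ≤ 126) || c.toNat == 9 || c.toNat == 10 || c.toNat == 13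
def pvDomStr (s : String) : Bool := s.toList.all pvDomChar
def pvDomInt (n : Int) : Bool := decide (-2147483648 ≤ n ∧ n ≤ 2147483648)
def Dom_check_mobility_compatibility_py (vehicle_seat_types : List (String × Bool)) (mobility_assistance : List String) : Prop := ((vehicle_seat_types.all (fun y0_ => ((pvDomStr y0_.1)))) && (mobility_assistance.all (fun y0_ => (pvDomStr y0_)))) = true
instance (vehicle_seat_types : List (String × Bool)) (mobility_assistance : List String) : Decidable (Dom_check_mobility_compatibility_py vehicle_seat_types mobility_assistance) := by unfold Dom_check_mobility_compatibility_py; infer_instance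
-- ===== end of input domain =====

-- B inverts A's iteration: it aggregates the set of lowered labels in one pass, then tests each seat feature once; objective: alternative.
-- ===== PORT A =====
-- A: literal transliteration of the per-passenger if/elif cascade, early return via recursion.
def check_mobility_compatibility_py (vehicle_seat_types : List (String × Bool)) (mobility_assistance : List String) : Bool :=
  match mobility_assistance with
  | [] => true
  | assistance :: rest =>
    let assistance_lower := PySem.Str.lower assistance
    if assistance_lower == "wheelchair" && !(PySem.Dict.getD (PySem.Dict.mk vehicle_seat_types) "wheelchair" false) then
      false
    else if (assistance_lower == "cane or walker" || assistance_lower == "cane" || assistance_lower == "walker")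
        && !(PySem.Dict.getD (PySem.Dict.mk vehicle_seat_types) "cane_walker" false) then
      false
    else if assistance_lower == "stretcher" && !(PySem.Dict.getD (PySem.Dict.mk vehicle_seat_types) "stretcher" false) then
      false
    else
      check_mobility_compatibility_py vehicle_seat_types rest

-- ===== PORT B =====
-- B: build the set of lowered labels once, then check each of the three seat features once.
def check_mobility_compatibility_py_alt (vehicle_seat_types : List (String × Bool)) (mobility_assistance : List String) : Bool :=
  let labels : PySem.Set String := PySem.Set.ofList (mobility_assistance.map PySem.Str.lower)
  (!(PySem.Set.contains labels "wheelchair") || PySem.Dict.getD (PySem.Dict.mk vehicle_seat_types) "wheelchair" false)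
  && (!(["cane or walker", "cane", "walker"].any (fun l => PySem.Set.contains labels l))
      || PySem.Dict.getD (PySem.Dict.mk vehicle_seat_types) "cane_walker" false)
  && (!(PySem.Set.contains labels "stretcher") || PySem.Dict.getD (PySem.Dict.mk vehicle_seat_types) "stretcher" false)

-- ===== PRECONDITION & SPEC =====
def Spec_check_mobility_compatibility_py (vehicle_seat_types : List (String × Bool)) (mobility_assistance : List String) (out : Bool) : Prop := out = check_mobility_compatibility_py_alt vehicle_seat_types mobility_assistance
instance (vehicle_seat_types : List (String × Bool)) (mobility_assistance : List String) (out : Bool) : Decidable (Spec_check_mobility_compatibility_py vehicle_seat_types mobility_assistance out) := by unfold Spec_check_mobility_compatibility_py; infer_instance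

-- ===== CLAIM (what is proved, stated in full; the proofs are below) =====
def Claim_equal_check_mobility_compatibility_py : Prop := ∀ (vehicle_seat_types : List (String × Bool)) (mobility_assistance : List String), Dom_check_mobility_compatibility_py vehicle_seat_types mobility_assistance → Spec_check_mobility_compatibility_py vehicle_seat_types mobility_assistance (check_mobility_compatibility_py vehicle_seat_types mobility_assistance)

-- ===== LEMMAS AND PROOFS =====

-- membership in the dedup'd label set = membership in the mapped list
theorem contains_ofList_map (ma : List String) (f : String → String) (x : String) :
    PySem.Set.contains (PySem.Set.ofList (ma.map f)) x = ma.any (fun a => f a == x) := by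
  rw [Bool.eq_iff_iff]
  simp only [List.any_eq_true, beq_iff_eq, PySem.Set.contains,
    List.contains_iff_mem, PySem.Set.mem_ofList, List.mem_map]

-- A returns true iff no label triggers one of the three failing branches
theorem A_char (vst : List (String × Bool)) (ma : List String) :
    check_mobility_compatibility_py vst ma
      = !(ma.any (fun a =>
          (PySem.Str.lower a == "wheelchair" && !(PySem.Dict.getD (PySem.Dict.mk vst) "wheelchair" false))
          || ((PySem.Str.lower a == "cane or walker" || PySem.Str.lower a == "cane" || PySem.Str.lower a == "walker")
              && !(PySem.Dict.getD (PySem.Dict.mk vst) "cane_walker" false))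
          || (PySem.Str.lower a == "stretcher" && !(PySem.Dict.getD (PySem.Dict.mk vst) "stretcher" false)))) := by
  induction ma with
  | nil => rfl
  | cons a rest ih =>
    simp only [check_mobility_compatibility_py, List.any_cons, ih]
    by_cases h1 : (PySem.Str.lower a == "wheelchair" && !(PySem.Dict.getD (PySem.Dict.mk vst) "wheelchair" false)) = true
    · simp [h1]
    · by_cases h2 : ((PySem.Str.lower a == "cane or walker" || PySem.Str.lower a == "cane" || PySem.Str.lower a == "walker") && !(PySem.Dict.getD (PySem.Dict.mk vst) "cane_walker" false)) = true
      · simp [h2]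
      · by_cases h3 : (PySem.Str.lower a == "stretcher" && !(PySem.Dict.getD (PySem.Dict.mk vst) "stretcher" false)) = true
        · simp [h3]
        · simp only [Bool.not_eq_true] at h1 h2 h3
          simp [h1, h2, h3]

-- any distributes over pointwise disjunction
theorem any_or (l : List String) (p q : String → Bool) :
    l.any (fun a => p a || q a) = (l.any p || l.any q) := by
  induction l with
  | nil => rfl
  | cons a rest ih =>
    simp only [List.any_cons, ih]
    cases p a <;> cases q a <;> simp

-- distributing any over the constant-conjunct disjunction
theorem any_split (l : List String) (p q r : String → Bool) (c d e : Bool) :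
    l.any (fun a => (p a && c) || (q a && d) || (r a && e))
      = ((l.any p && c) || (l.any q && d) || (l.any r && e)) := by
  cases c <;> cases d <;> cases e <;> simp [any_or]

theorem ports_eq (vst : List (String × Bool)) (ma : List String) :
    check_mobility_compatibility_py vst ma = check_mobility_compatibility_py_alt vst ma := by
  rw [A_char, check_mobility_compatibility_py_alt]
  simp only [contains_ofList_map, List.any_cons, List.any_nil, any_split]
  cases hW : PySem.Dict.getD (PySem.Dict.mk vst) "wheelchair" false <;>
  cases hC : PySem.Dict.getD (PySem.Dict.mk vst) "cane_walker" false <;>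
  cases hS : PySem.Dict.getD (PySem.Dict.mk vst) "stretcher" false <;>
    simp [any_or, Bool.or_assoc, Bool.and_assoc]

-- ===== VERDICT =====
theorem check_mobility_compatibility_py_spec : Claim_equal_check_mobility_compatibility_py := by
  intro vst ma _
  exact ports_eq vst ma
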